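-- pv_equiv track=rewrite | github.com/dreamtides/dreamtides | scripts/draft_simulation/sweep_exclusion.py | classify_pack
-- ===== SOURCE A (Python) =====
-- NEUTRAL = "Neutral"
--
-- def classify_pack(pack_tides, dominant_tides, allied_tides):
--     dominant = sum(1 for t in pack_tides if t in dominant_tides)
--     allied = sum(1 for t in pack_tides if t in allied_tides and t not in dominant_tides)
--     neutral = sum(
--         1 for t in pack_tides if t == NEUTRAL and NEUTRAL not in dominant_tides
--     )
--     distant = len(pack_tides) - dominant - allied - neutral
--     return {
--         "dominant": dominant,
--         "allied": allied,
--         "neutral": neutral,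
--         "distant": distant,
--     }
-- ===== SOURCE B (Python) =====
-- NEUTRAL = "Neutral"
--
--
-- def classify_pack(pack_tides, dominant_tides, allied_tides):
--     freq = {}
--     for t in pack_tides:
--         freq[t] = freq.get(t, 0) + 1
--     dom = set(dominant_tides)
--     ally = set(allied_tides)
--     dominant = 0
--     allied = 0
--     for t, c in freq.items():
--         if t in dom:
--             dominant += c
--         elif t in ally:
--             allied += c
--     neutral = 0 if NEUTRAL in dom else freq.get(NEUTRAL, 0)
--     distant = len(pack_tides) - dominant - allied - neutral
--     return {
--         "dominant": dominant,
--         "allied": allied,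
--         "neutral": neutral,
--         "distant": distant,
--     }
-- ===== Notes on version B (the rewrite author's own statement) =====
-- stated objective: alternative
-- what changed: Tally pack_tides once into a frequency dict and classify each DISTINCT tide in a single pass with set lookups (neutral becomes one dict lookup), instead of three full rescans of pack_tides with list membership tests.
import Mathlib
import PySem

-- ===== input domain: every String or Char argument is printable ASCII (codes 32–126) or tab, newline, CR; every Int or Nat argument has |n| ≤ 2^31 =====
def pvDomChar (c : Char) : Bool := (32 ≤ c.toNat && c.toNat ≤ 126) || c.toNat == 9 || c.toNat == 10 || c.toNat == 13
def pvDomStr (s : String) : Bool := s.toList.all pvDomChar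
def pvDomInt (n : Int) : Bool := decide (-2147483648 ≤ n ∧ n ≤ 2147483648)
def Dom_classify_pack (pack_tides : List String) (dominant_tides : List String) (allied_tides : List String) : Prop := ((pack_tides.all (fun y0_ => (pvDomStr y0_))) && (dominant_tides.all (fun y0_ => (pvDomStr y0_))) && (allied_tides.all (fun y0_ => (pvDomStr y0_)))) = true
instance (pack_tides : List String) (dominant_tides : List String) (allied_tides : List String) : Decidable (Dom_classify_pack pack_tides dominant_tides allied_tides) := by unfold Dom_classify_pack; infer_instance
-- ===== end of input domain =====

-- B tallies pack_tides once into a frequency dict and classifies each DISTINCT tide in one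
-- pass with set lookups, instead of A's three full rescans with list membership tests.

-- ===== PORT A =====
def classify_pack (pack_tides : List String) (dominant_tides : List String) (allied_tides : List String) : List (String × Int) :=
  let dominant : Int := pack_tides.foldl (fun acc t => if dominant_tides.contains t then acc + 1 else acc) 0
  let allied : Int := pack_tides.foldl (fun acc t => if allied_tides.contains t && !(dominant_tides.contains t) then acc + 1 else acc) 0
  let neutral : Int := pack_tides.foldl (fun acc t => if t == "Neutral" && !(dominant_tides.contains "Neutral") then acc + 1 else acc) 0
  let distant : Int := (pack_tides.length : Int) - dominant - allied - neutral
  [("dominant", dominant), ("allied", allied), ("neutral", neutral), ("distant", distant)]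

-- ===== PORT B =====
def classify_pack_alt (pack_tides : List String) (dominant_tides : List String) (allied_tides : List String) : List (String × Int) :=
  let freq : PySem.Dict String Int := pack_tides.foldl (fun d t => d.insert t (d.getD t 0 + 1)) PySem.Dict.empty
  let dom : PySem.Set String := PySem.Set.ofList dominant_tides
  let ally : PySem.Set String := PySem.Set.ofList allied_tides
  let da : Int × Int := freq.items.foldl (fun s tc =>
      if PySem.Set.contains dom tc.1 then (s.1 + tc.2, s.2)
      else if PySem.Set.contains ally tc.1 then (s.1, s.2 + tc.2)
      else s) ((0 : Int), (0 : Int))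
  let neutral : Int := if PySem.Set.contains dom "Neutral" then 0 else freq.getD "Neutral" 0
  let distant : Int := (pack_tides.length : Int) - da.1 - da.2 - neutral
  [("dominant", da.1), ("allied", da.2), ("neutral", neutral), ("distant", distant)]

-- ===== PRECONDITION & SPEC =====
def Spec_classify_pack (pack_tides : List String) (dominant_tides : List String) (allied_tides : List String) (out : List (String × Int)) : Prop := out = classify_pack_alt pack_tides dominant_tides allied_tides
instance (pack_tides : List String) (dominant_tides : List String) (allied_tides : List String) (out : List (String × Int)) : Decidable (Spec_classify_pack pack_tides dominant_tides allied_tides out) := by unfold Spec_classify_pack; infer_instance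

-- ===== CLAIM (what is proved, stated in full; the proofs are below) =====
def Claim_equal_classify_pack : Prop := ∀ (pack_tides : List String) (dominant_tides : List String) (allied_tides : List String), Dom_classify_pack pack_tides dominant_tides allied_tides → Spec_classify_pack pack_tides dominant_tides allied_tides (classify_pack pack_tides dominant_tides allied_tides)

-- ===== LEMMAS AND PROOFS =====

theorem sum_counter_filter (p : List String) (q : String → Bool) :
    (PySem.Dict.counter p).items.foldl (fun acc tc => if q tc.1 then acc + tc.2 else acc) (0 : Int)
      = (p.countP q : Int) := by
  rw [PySem.Dict.items_counter, List.foldl_map]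
  rw [PySem.List.foldl_if_eq_foldl_filter (p := fun k => q k) (f := fun acc k => acc + (p.count k : Int))]
  rw [PySem.List.foldl_add (g := fun k => (p.count k : Int))]
  have hperm : List.Perm (PySem.Set.ofList p) p.dedup := by
    apply (List.perm_ext_iff_of_nodup (PySem.Set.nodup_ofList p) p.nodup_dedup).2
    intro x; simp [PySem.Set.mem_ofList, List.mem_dedup]
  have hp := (hperm.filter q).map (fun k => (p.count k : Int))
  rw [hp.sum_eq, ← List.sum_map_count_dedup_filter_eq_countP q p, Nat.cast_list_sum, List.map_map]
  rw [zero_add]; simp only [Function.comp_def]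

theorem contains_ofList' (l : List String) (x : String) :
    PySem.Set.contains (PySem.Set.ofList l) x = l.contains x := by
  simp [PySem.Set.contains]

theorem classify_pack_eq (p d a : List String) :
    classify_pack p d a = classify_pack_alt p d a := by
  simp only [classify_pack, classify_pack_alt]
  rw [PySem.Dict.foldl_insert_getD_add_one_eq_counter]
  have hstep : (fun (s : Int × Int) (tc : String × Int) =>
      if PySem.Set.contains (PySem.Set.ofList d) tc.1 then (s.1 + tc.2, s.2)
      else if PySem.Set.contains (PySem.Set.ofList a) tc.1 then (s.1, s.2 + tc.2)
      else s)
    = fun s tc =>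
      ((fun (x : Int) (tc : String × Int) => if PySem.Set.contains (PySem.Set.ofList d) tc.1 then x + tc.2 else x) s.1 tc,
       (fun (x : Int) (tc : String × Int) => if !PySem.Set.contains (PySem.Set.ofList d) tc.1 && PySem.Set.contains (PySem.Set.ofList a) tc.1 then x + tc.2 else x) s.2 tc) := by
    funext s tc
    by_cases h1 : tc.1 ∈ d <;> by_cases h2 : tc.1 ∈ a <;> simp [PySem.Set.contains, h1, h2]
  rw [hstep, PySem.List.foldl_prod_mk
    (f := fun (x : Int) (tc : String × Int) => if PySem.Set.contains (PySem.Set.ofList d) tc.1 then x + tc.2 else x)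
    (g := fun (x : Int) (tc : String × Int) => if !PySem.Set.contains (PySem.Set.ofList d) tc.1 && PySem.Set.contains (PySem.Set.ofList a) tc.1 then x + tc.2 else x)]
  rw [sum_counter_filter p (fun k => PySem.Set.contains (PySem.Set.ofList d) k),
      sum_counter_filter p (fun k => !PySem.Set.contains (PySem.Set.ofList d) k && PySem.Set.contains (PySem.Set.ofList a) k)]
  rw [PySem.List.foldl_if_add_one, PySem.List.foldl_if_add_one, PySem.List.foldl_if_add_one]
  have e1 : p.countP (fun t => d.contains t) = p.countP (fun k => PySem.Set.contains (PySem.Set.ofList d) k) := by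
    apply List.countP_congr; intro x _; simp
  have e2 : p.countP (fun t => a.contains t && !d.contains t)
      = p.countP (fun k => !PySem.Set.contains (PySem.Set.ofList d) k && PySem.Set.contains (PySem.Set.ofList a) k) := by
    apply List.countP_congr; intro x _; simp [Bool.and_comm]
  have e3 : ((p.countP (fun t => t == "Neutral" && !(d.contains "Neutral")) : Nat) : Int)
      = (if PySem.Set.contains (PySem.Set.ofList d) "Neutral" then 0 else (PySem.Dict.counter p).getD "Neutral" 0) := by
    rw [PySem.Dict.getD_counter, contains_ofList']
    by_cases hm : "Neutral" ∈ d
    · simp [hm]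
    · simp [hm, List.count]
  rw [zero_add, zero_add, zero_add, e1, e2, e3]

-- ===== VERDICT (by name: the statement is the Claim_ definition above) =====
theorem classify_pack_spec : Claim_equal_classify_pack := by
  intro p d a _
  unfold Spec_classify_pack
  exact classify_pack_eq p d a
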